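-- pv_equiv track=rewrite | github.com/TaylorChristie/cmput355-tetris-solver | solver.py | calculate_intersection
-- ===== SOURCE A (Python) =====
-- def calculate_intersection(field, x, y, height, width, image):
--     intersection = False
--     for i in range(4):
--         for j in range(4):
--             if i * 4 + j in image:
--                 if i + y > height - 1 or \
--                         j + x > width - 1 or \
--                         j + x < 0 or \
--                         field[i + y][j + x] > 0:
--                     intersection = True
--     return intersection
-- ===== SOURCE B (Python) =====
-- def calculate_intersection(field, x, y, height, width, image):
--     def blocked(r, c):
--         return (r > height - 1 or c > width - 1 or c < 0
--                 or field[r][c] > 0)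
--     return any(blocked(y + v // 4, x + v % 4)
--                for v in image if 0 <= v < 16)
-- ===== Notes on version B (the rewrite author's own statement) =====
-- stated objective: alternative
-- what changed: B replaces A's fixed 4x4 double loop with a per-cell membership scan and a mutable flag by a single filter-then-any pipeline over the elements of image: in-range values are decoded to absolute board coordinates via divmod and tested by a named blocked(r,c) predicate.
import Mathlib
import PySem

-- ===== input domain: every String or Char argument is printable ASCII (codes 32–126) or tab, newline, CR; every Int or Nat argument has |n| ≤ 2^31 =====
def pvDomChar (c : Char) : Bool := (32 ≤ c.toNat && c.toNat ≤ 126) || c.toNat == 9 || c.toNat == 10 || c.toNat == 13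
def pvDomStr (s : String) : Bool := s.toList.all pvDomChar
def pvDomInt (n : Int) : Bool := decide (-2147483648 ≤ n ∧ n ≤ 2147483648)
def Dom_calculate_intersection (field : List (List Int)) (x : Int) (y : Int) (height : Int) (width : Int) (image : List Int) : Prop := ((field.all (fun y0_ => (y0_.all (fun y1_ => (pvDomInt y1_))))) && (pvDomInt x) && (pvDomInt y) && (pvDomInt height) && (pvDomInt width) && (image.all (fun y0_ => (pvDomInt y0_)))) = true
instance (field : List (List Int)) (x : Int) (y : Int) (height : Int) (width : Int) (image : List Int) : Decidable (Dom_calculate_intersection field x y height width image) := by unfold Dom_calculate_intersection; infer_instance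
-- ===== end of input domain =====

-- B replaces A's 4×4 double loop with flag accumulator by a filter-then-any pipeline over
-- the elements of image, decoding each in-range value to absolute coordinates and testing
-- a named blocked predicate; objective: alternative (different traversal, not measured faster).

-- ===== PORT A =====
def calculate_intersection (field : List (List Int)) (x : Int) (y : Int) (height : Int) (width : Int) (image : List Int) : Bool :=
  (PySem.List.pyRange 0 4 1).foldl (fun inter i =>
    (PySem.List.pyRange 0 4 1).foldl (fun inter j =>
      if i * 4 + j ∈ image then
        if i + y > height - 1 ∨ j + x > width - 1 ∨ j + x < 0 ∨
            PySem.List.pyGetD (PySem.List.pyGetD field (i + y) []) (j + x) 0 > 0 then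
          true
        else inter
      else inter) inter) false

-- ===== PORT B =====
-- the inner closure `blocked(r, c)` of Source B (captures field/height/width)
def pvBlocked (field : List (List Int)) (height width r c : Int) : Bool :=
  decide (r > height - 1 ∨ c > width - 1 ∨ c < 0 ∨
    PySem.List.pyGetD (PySem.List.pyGetD field r []) c 0 > 0)

def calculate_intersection_alt (field : List (List Int)) (x : Int) (y : Int) (height : Int) (width : Int) (image : List Int) : Bool :=
  (image.filter (fun v => decide (0 ≤ v ∧ v < 16))).any
    (fun v => pvBlocked field height width (y + PySem.Int.floordiv v 4) (x + PySem.Int.mod v 4))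

-- ===== PRECONDITION & SPEC =====
-- Pre_ excludes exactly the inputs where A raises an IndexError: some occupied cell
-- (i, j) passes the bound tests (i+y ≤ height-1, 0 ≤ j+x ≤ width-1) but the access
-- field[i+y][j+x] is out of range (Python negative indices count from the end).
def Pre_calculate_intersection (field : List (List Int)) (x : Int) (y : Int) (height : Int) (width : Int) (image : List Int) : Prop :=
  ∀ i ∈ ([0, 1, 2, 3] : List Int), ∀ j ∈ ([0, 1, 2, 3] : List Int),
    (i * 4 + j ∈ image ∧ ¬(i + y > height - 1 ∨ j + x > width - 1 ∨ j + x < 0)) →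
      ((PySem.List.pyGet? field (i + y)).bind
        (fun row => PySem.List.pyGet? row (j + x))).isSome = true
instance (field : List (List Int)) (x : Int) (y : Int) (height : Int) (width : Int) (image : List Int) : Decidable (Pre_calculate_intersection field x y height width image) := by unfold Pre_calculate_intersection; infer_instance
def pvWitness_calculate_intersection : List (List Int) × Int × Int × Int × Int × List Int :=
  ([[0, 1], [1, 0]], 0, 0, 2, 2, [0, 1, 4])

def Spec_calculate_intersection (field : List (List Int)) (x : Int) (y : Int) (height : Int) (width : Int) (image : List Int) (out : Bool) : Prop := out = calculate_intersection_alt field x y height width image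
instance (field : List (List Int)) (x : Int) (y : Int) (height : Int) (width : Int) (image : List Int) (out : Bool) : Decidable (Spec_calculate_intersection field x y height width image out) := by unfold Spec_calculate_intersection; infer_instance

-- ===== CLAIM (what is proved, stated in full; the proofs are below) =====
def Claim_equal_calculate_intersection : Prop := ∀ (field : List (List Int)) (x : Int) (y : Int) (height : Int) (width : Int) (image : List Int), Dom_calculate_intersection field x y height width image → Pre_calculate_intersection field x y height width image → Spec_calculate_intersection field x y height width image (calculate_intersection field x y height width image)

-- ===== LEMMAS AND PROOFS =====

-- an or-accumulating foldl is `b || any`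
theorem pv_foldl_or_any {α : Type} (f : α → Bool) (g : Bool → α → Bool)
    (h : ∀ a c, g a c = (a || f c)) (l : List α) (b : Bool) :
    l.foldl g b = (b || l.any f) := by
  induction l generalizing b with
  | nil => simp
  | cons c t ih => simp [List.foldl, h, ih, Bool.or_assoc]

theorem pv_A_any (field : List (List Int)) (x y height width : Int) (image : List Int) :
    calculate_intersection field x y height width image =
      ([0, 1, 2, 3] : List Int).any (fun i => ([0, 1, 2, 3] : List Int).any
        (fun j => decide (i * 4 + j ∈ image) && pvBlocked field height width (i + y) (j + x))) := by
  have hr : PySem.List.pyRange 0 4 1 = ([0, 1, 2, 3] : List Int) := by decide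
  unfold calculate_intersection
  rw [hr]
  rw [pv_foldl_or_any (fun i => ([0, 1, 2, 3] : List Int).any
        (fun j => decide (i * 4 + j ∈ image) && pvBlocked field height width (i + y) (j + x)))
      _ (fun a i => by
        rw [pv_foldl_or_any (fun j => decide (i * 4 + j ∈ image) && pvBlocked field height width (i + y) (j + x))
            _ (fun a j => by
              by_cases hm : i * 4 + j ∈ image <;>
                simp [hm, pvBlocked, Bool.or_comm])])]
  simp

theorem pv_decode (i j : Int) (_hi : 0 ≤ i ∧ i < 4) (hj : 0 ≤ j ∧ j < 4) :
    PySem.Int.floordiv (i * 4 + j) 4 = i ∧ PySem.Int.mod (i * 4 + j) 4 = j := by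
  rw [PySem.Int.floordiv_eq_ediv_of_pos (by omega), PySem.Int.mod_eq_emod_of_pos (by omega)]
  omega

theorem pv_encode (v : Int) (hv : 0 ≤ v ∧ v < 16) :
    (PySem.Int.floordiv v 4) * 4 + PySem.Int.mod v 4 = v ∧
      (0 ≤ PySem.Int.floordiv v 4 ∧ PySem.Int.floordiv v 4 < 4) ∧
      (0 ≤ PySem.Int.mod v 4 ∧ PySem.Int.mod v 4 < 4) := by
  rw [PySem.Int.floordiv_eq_ediv_of_pos (by omega), PySem.Int.mod_eq_emod_of_pos (by omega)]
  omega

-- ===== VERDICT (by name: the statement is the Claim_ definition above) =====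
theorem calculate_intersection_spec : Claim_equal_calculate_intersection := by
  intro field x y height width image _ _
  unfold Spec_calculate_intersection calculate_intersection_alt
  rw [pv_A_any, List.any_filter, Bool.eq_iff_iff]
  simp only [List.any_eq_true, Bool.and_eq_true, decide_eq_true_eq, List.mem_cons,
    List.not_mem_nil, or_false]
  constructor
  · rintro ⟨i, hi, j, hj, hm, hc⟩
    refine ⟨i * 4 + j, hm, ⟨by omega, by omega⟩, ?_⟩
    obtain ⟨h1, h2⟩ := pv_decode i j (by omega) (by omega)
    rw [h1, h2, Int.add_comm y i, Int.add_comm x j]; exact hc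
  · rintro ⟨v, hv, hr, hc⟩
    obtain ⟨h1, h2, h3⟩ := pv_encode v hr
    refine ⟨PySem.Int.floordiv v 4, by omega, PySem.Int.mod v 4, by omega, ?_, ?_⟩
    · rw [h1]; exact hv
    · rw [Int.add_comm y (PySem.Int.floordiv v 4), Int.add_comm x (PySem.Int.mod v 4)] at hc; exact hc
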